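-- pv_equiv track=rewrite | github.com/the-omega-institute/automath | theory/2026_golden_ratio_driven_scan_projection_generation_recursive_emergence/scripts/equational_theory/gf_prime_power_scan.py | equation_difference_vectors
-- ===== SOURCE A (Python) =====
-- VARS = ("x", "y", "z", "w", "u", "v")
--
-- VAR_INDEX = {var: i for i, var in enumerate(VARS)}
--
-- Poly = tuple[tuple[tuple[int, int], int], ...]
--
-- DiffVector = tuple[Poly, ...]
--
-- def add_poly(poly: dict[tuple[int, int], int], other: dict[tuple[int, int], int], scale: int = 1) -> dict[tuple[int, int], int]:
--     result = dict(poly)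
--     for key, value in other.items():
--         result[key] = result.get(key, 0) + scale * value
--         if result[key] == 0:
--             del result[key]
--     return result
--
-- def shift_poly(poly: dict[tuple[int, int], int], da: int, db: int) -> dict[tuple[int, int], int]:
--     return {(a_degree + da, b_degree + db): coeff for (a_degree, b_degree), coeff in poly.items()}
--
-- def canon_poly(poly: dict[tuple[int, int], int]) -> Poly:
--     return tuple(sorted(poly.items()))
--
-- def term_polynomial_vector(tokens: tuple[str, ...]) -> list[dict[tuple[int, int], int]]:
--     stack: list[list[dict[tuple[int, int], int]]] = []
--     for token in tokens:
--         if token == "+":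
--             right = stack.pop()
--             left = stack.pop()
--             stack.append(
--                 [
--                     add_poly(shift_poly(left[i], 1, 0), shift_poly(right[i], 0, 1))
--                     for i in range(len(VARS))
--                 ]
--             )
--         else:
--             vector = [{} for _ in VARS]
--             vector[VAR_INDEX[token]][(0, 0)] = 1
--             stack.append(vector)
--     return stack[0]
--
-- def equation_difference_vectors(
--     equations: list[tuple[tuple[str, ...], tuple[str, ...], str]],
-- ) -> list[DiffVector]:
--     differences = []
--     for lhs, rhs, _ in equations:
--         lhs_vector = term_polynomial_vector(lhs)
--         rhs_vector = term_polynomial_vector(rhs)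
--         differences.append(
--             tuple(
--                 canon_poly(add_poly(lhs_vector[i], rhs_vector[i], -1))
--                 for i in range(len(VARS))
--             )
--         )
--     return differences
-- ===== SOURCE B (Python) =====
-- # B: parse the postfix tokens into a lightweight binary tree, then fill per-variable
-- # exponent counters by one DFS that threads the running (a, b) exponents; subtract the
-- # RHS counters from the LHS counters per component and emit tuple(sorted(items)).
-- VARS = ("x", "y", "z", "w", "u", "v")
-- VAR_INDEX = {var: i for i, var in enumerate(VARS)}
--
--
-- def _parse(tokens):
--     stack = []
--     for token in tokens:
--         if token == "+":
--             right = stack.pop()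
--             left = stack.pop()
--             stack.append((left, right))
--         else:
--             stack.append(token)
--     return stack[0]
--
--
-- def _term_counters(tokens):
--     vec = [dict() for _ in VARS]
--
--     def dfs(node, a, b):
--         if isinstance(node, str):
--             d = vec[VAR_INDEX[node]]
--             d[(a, b)] = d.get((a, b), 0) + 1
--         else:
--             dfs(node[0], a + 1, b)
--             dfs(node[1], a, b + 1)
--
--     dfs(_parse(tokens), 0, 0)
--     return vec
--
--
-- def _sub(lhs, rhs):
--     d = dict(lhs)
--     for key, value in rhs.items():
--         new = d.get(key, 0) - value
--         if new == 0:
--             d.pop(key, None)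
--         else:
--             d[key] = new
--     return d
--
--
-- def equation_difference_vectors(equations):
--     return [
--         tuple(
--             tuple(sorted(_sub(l, r).items()))
--             for l, r in zip(_term_counters(lhs), _term_counters(rhs))
--         )
--         for lhs, rhs, _ in equations
--     ]
-- ===== Notes on version B (the rewrite author's own statement) =====
-- stated objective: alternative
-- what changed: Instead of merging per-variable polynomial-vector dicts at every '+' of the postfix stack loop, B parses the tokens into a binary tree on the stack and fills per-variable exponent counters with one DFS that threads the running (a,b) exponents, then subtracts RHS from LHS counters per component.
import Mathlib
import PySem

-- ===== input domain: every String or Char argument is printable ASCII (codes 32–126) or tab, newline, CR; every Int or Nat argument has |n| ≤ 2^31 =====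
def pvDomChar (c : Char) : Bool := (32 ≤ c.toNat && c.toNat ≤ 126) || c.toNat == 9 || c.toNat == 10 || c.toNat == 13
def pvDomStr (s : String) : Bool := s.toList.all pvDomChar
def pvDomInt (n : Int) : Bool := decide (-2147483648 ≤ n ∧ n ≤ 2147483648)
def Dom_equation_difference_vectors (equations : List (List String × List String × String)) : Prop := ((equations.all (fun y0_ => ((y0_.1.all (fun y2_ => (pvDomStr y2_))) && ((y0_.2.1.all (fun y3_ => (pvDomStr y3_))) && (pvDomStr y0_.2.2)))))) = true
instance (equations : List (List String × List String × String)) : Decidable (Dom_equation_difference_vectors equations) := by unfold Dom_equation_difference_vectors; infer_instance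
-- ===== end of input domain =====

-- B replaces A's stack of per-variable polynomial vectors by a postfix-parsed binary tree plus
-- one exponent-threading DFS into per-variable counters (objective: alternative decomposition).

-- ===== PORT A =====
def pvVARS : List String := ["x", "y", "z", "w", "u", "v"]

abbrev PolyD := PySem.Dict (Int × Int) Int

def addPoly (poly other : PolyD) (scale : Int) : PolyD :=
  other.items.foldl (fun result kv =>
    let v := result.getD kv.1 0 + scale * kv.2
    let result := result.insert kv.1 v
    if v = 0 then result.erase kv.1 else result) poly

def shiftPoly (poly : PolyD) (da db : Int) : PolyD :=
  PySem.Dict.ofList (poly.items.map (fun kv => ((kv.1.1 + da, kv.1.2 + db), kv.2)))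

-- tuple(sorted(poly.items())): Python compares the pairs ((a,b),c) lexicographically; the keys
-- (a,b) of one dict are distinct, so the coefficient is never compared and sorting by the
-- lexicographic key (a,b) is exact here.
def canonPoly (poly : PolyD) : List ((Int × Int) × Int) :=
  PySem.List.sorted poly.items (fun p => (toLex p.1 : Lex (Int × Int))) false

-- the Python stack grows at its end; here the head is the top, so stack[0] is getLast?
def stepA (stack : List (List PolyD)) (token : String) : List (List PolyD) :=
  if token == "+" then
    match stack with
    | right :: left :: rest =>
        ((List.range 6).map (fun i =>
          addPoly (shiftPoly (left.getD i PySem.Dict.empty) 1 0)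
                  (shiftPoly (right.getD i PySem.Dict.empty) 0 1) 1)) :: rest
    | _ => []          -- IndexError (stack underflow): outside Pre_
  else
    match PySem.List.index? pvVARS token with
    | some j => ((List.replicate 6 (PySem.Dict.empty : PolyD)).set j
                   (PySem.Dict.empty.insert (0, 0) 1)) :: stack
    | none => []       -- KeyError: outside Pre_

def termPolynomialVector (tokens : List String) : List PolyD :=
  match (tokens.foldl stepA []).getLast? with
  | some v => v
  | none => []         -- IndexError (stack[0] of the empty stack): outside Pre_

def equation_difference_vectors (equations : List (List String × List String × String)) : List (List (List ((Int × Int) × Int))) :=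
  equations.foldl (fun differences eq =>
    let lhsV := termPolynomialVector eq.1
    let rhsV := termPolynomialVector eq.2.1
    differences ++ [(List.range 6).map (fun i =>
      canonPoly (addPoly (lhsV.getD i PySem.Dict.empty) (rhsV.getD i PySem.Dict.empty) (-1)))]) []

-- ===== PORT B =====
inductive PTree
  | leaf : String → PTree
  | node : PTree → PTree → PTree
deriving DecidableEq, Repr

def stepB (stack : List PTree) (token : String) : List PTree :=
  if token == "+" then
    match stack with
    | right :: left :: rest => PTree.node left right :: rest
    | _ => []          -- IndexError: outside Pre_
  else PTree.leaf token :: stack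

def parseB (tokens : List String) : Option PTree :=
  (tokens.foldl stepB []).getLast?   -- stack[0]; the head is the top here too

def dfsB : PTree → Int → Int → List PolyD → List PolyD
  | PTree.leaf s, a, b, vec =>
      match PySem.List.index? pvVARS s with
      | some j => vec.modify j (fun d => d.modify (a, b) 0 (· + 1))
      | none => vec    -- KeyError in Python B: outside Pre_
  | PTree.node l r, a, b, vec => dfsB r a (b + 1) (dfsB l (a + 1) b vec)

def termCounters (tokens : List String) : List PolyD :=
  match parseB tokens with
  | some root => dfsB root 0 0 (List.replicate 6 PySem.Dict.empty)
  | none => []         -- IndexError: outside Pre_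

def subPoly (lhs rhs : PolyD) : PolyD :=
  rhs.items.foldl (fun d kv =>
    let nv := d.getD kv.1 0 - kv.2
    if nv = 0 then d.erase kv.1 else d.insert kv.1 nv) lhs

def equation_difference_vectors_alt (equations : List (List String × List String × String)) : List (List (List ((Int × Int) × Int))) :=
  equations.map (fun eq =>
    List.zipWith (fun l r => canonPoly (subPoly l r)) (termCounters eq.1) (termCounters eq.2.1))

-- ===== PRECONDITION & SPEC =====
-- Pre_ excludes exactly the inputs on which Python A raises: a token that is neither "+" nor a
-- variable (KeyError) and postfix token lists whose stack discipline underflows on "+" or ends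
-- with an empty stack (IndexError). okTokens ts n checks this arity/depth condition from depth n.
def okTokens : List String → Nat → Bool
  | [], n => decide (1 ≤ n)
  | t :: ts, n =>
    if t == "+" then decide (2 ≤ n) && okTokens ts (n - 1)
    else (PySem.List.index? pvVARS t).isSome && okTokens ts (n + 1)

def Pre_equation_difference_vectors (equations : List (List String × List String × String)) : Prop :=
  (equations.all (fun eq => okTokens eq.1 0 && okTokens eq.2.1 0)) = true
instance (equations : List (List String × List String × String)) : Decidable (Pre_equation_difference_vectors equations) := by unfold Pre_equation_difference_vectors; infer_instance

def pvWitness_equation_difference_vectors : (List (List String × List String × String)) :=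
  [(["x", "y", "+"], (["y"], "gf")), (["z"], (["z", "x", "+", "u", "+"], "gf2"))]

def Spec_equation_difference_vectors (equations : List (List String × List String × String)) (out : List (List (List ((Int × Int) × Int)))) : Prop := out = equation_difference_vectors_alt equations
instance (equations : List (List String × List String × String)) (out : List (List (List ((Int × Int) × Int)))) : Decidable (Spec_equation_difference_vectors equations out) := by unfold Spec_equation_difference_vectors; infer_instance

-- ===== CLAIM (what is proved, stated in full; the proofs are below) =====
def Claim_equal_equation_difference_vectors : Prop := ∀ (equations : List (List String × List String × String)), Dom_equation_difference_vectors equations → Pre_equation_difference_vectors equations → Spec_equation_difference_vectors equations (equation_difference_vectors equations)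

-- ===== LEMMAS AND PROOFS =====

-- d represents the finitely-supported function f: nodup keys, entries exactly the support of f
def RepD (d : PolyD) (f : (Int × Int) → Int) : Prop :=
  d.keys.Nodup ∧ ∀ k, d.get? k = if f k = 0 then none else some (f k)

theorem RepD_congr {d : PolyD} {f g : (Int × Int) → Int} (h : RepD d f) (hfg : ∀ k, f k = g k)
    : RepD d g := by
  refine ⟨h.1, fun k => ?_⟩; rw [← hfg k]; exact h.2 k

-- the multiset of (exponent ↦ coefficient) contributions of variable i in tree t, at base (0,0)
def contrib : PTree → Nat → (Int × Int) → Int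
  | PTree.leaf s, i, k => if PySem.List.index? pvVARS s = some i ∧ k = (0, 0) then 1 else 0
  | PTree.node l r, i, k => contrib l i (k.1 - 1, k.2) + contrib r i (k.1, k.2 - 1)

theorem contrib_nonneg (t : PTree) (i : Nat) (k : Int × Int) : 0 ≤ contrib t i k := by
  induction t generalizing k with
  | leaf s => simp only [contrib]; split <;> omega
  | node l r hl hr => exact add_nonneg (hl _) (hr _)

theorem RepD_empty : RepD PySem.Dict.empty (fun _ => 0) := by
  constructor
  · simp [PySem.Dict.keys, PySem.Dict.empty]
  · intro k; simp [PySem.Dict.get?, PySem.Dict.empty]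

theorem nodup_keys_erase {d : PolyD} (h : d.keys.Nodup) (k : Int × Int)
    : (d.erase k).keys.Nodup := by
  simp only [PySem.Dict.keys, PySem.Dict.erase] at *
  exact (List.Sublist.map _ List.filter_sublist).nodup h

theorem find?_filter_ne (l : List ((Int × Int) × Int)) (k k' : Int × Int) (hne : k' ≠ k) :
    (l.filter (fun p => !(p.1 == k))).find? (fun p => p.1 == k') = l.find? (fun p => p.1 == k') := by
  have hkk : (k == k') = false := by simp [Ne.symm hne]
  induction l with
  | nil => rfl
  | cons p t ih =>
    by_cases hk : p.1 = k
    · have h1 : (p.1 == k') = false := by simp [hk, Ne.symm hne]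
      simp [hk, ih, hkk]
    · by_cases hk' : p.1 = k'
      · simp [hk', hne]
      · simp [hk, hk', ih]

theorem get?_erase (d : PolyD) (k k' : Int × Int)
    : (d.erase k).get? k' = if k' = k then none else d.get? k' := by
  simp only [PySem.Dict.get?, PySem.Dict.erase]
  by_cases hk : k' = k
  · subst hk
    have h2 : (d.items.filter (fun p => !(p.1 == k'))).find? (fun p => p.1 == k') = none := by
      rw [List.find?_eq_none]
      intro p hp
      have := (List.mem_filter.mp hp).2
      simpa using this
    simp [h2]
  · simp [hk, find?_filter_ne d.items k k' hk]



theorem RepD_insert {d : PolyD} {f : (Int × Int) → Int} (h : RepD d f) (k : Int × Int) (v : Int)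
    (hv : v ≠ 0) : RepD (d.insert k v) (fun k' => if k' = k then v else f k') := by
  refine ⟨PySem.Dict.nodup_keys_insert d k v h.1, fun k' => ?_⟩
  rw [PySem.Dict.get?_insert]
  by_cases hk : k' = k
  · simp [hk, hv]
  · simp [hk, h.2 k']

theorem RepD_erase {d : PolyD} {f : (Int × Int) → Int} (h : RepD d f) (k : Int × Int)
    : RepD (d.erase k) (fun k' => if k' = k then 0 else f k') := by
  refine ⟨nodup_keys_erase h.1 k, fun k' => ?_⟩
  rw [get?_erase]
  by_cases hk : k' = k
  · simp [hk]
  · simp [hk, h.2 k']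

theorem RepD_getD {d : PolyD} {f : (Int × Int) → Int} (h : RepD d f) (k : Int × Int)
    : d.getD k 0 = f k := by
  rw [PySem.Dict.getD_eq_get?_getD, h.2 k]
  split <;> simp_all

theorem RepD_step (s : Int) {d : PolyD} {f : (Int × Int) → Int} (h : RepD d f)
    (k0 : Int × Int) (v0 : Int) :
    RepD (let v := d.getD k0 0 + s * v0
          let d' := d.insert k0 v
          if v = 0 then d'.erase k0 else d')
      (fun k => if k = k0 then f k0 + s * v0 else f k) := by
  simp only [RepD_getD h k0]
  by_cases hz : f k0 + s * v0 = 0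
  · simp only [if_pos hz]
    refine ⟨nodup_keys_erase (PySem.Dict.nodup_keys_insert d k0 _ h.1) k0, fun k' => ?_⟩
    rw [get?_erase, PySem.Dict.get?_insert]
    by_cases hk : k' = k0
    · simp [hk, hz]
    · simp [hk, h.2 k']
  · simp only [if_neg hz]
    exact RepD_insert h k0 _ hz

def wsum (L : List ((Int × Int) × Int)) (k : Int × Int) : Int :=
  ((L.filter (fun p => p.1 = k)).map (·.2)).sum

theorem wsum_cons (p : (Int × Int) × Int) (L : List ((Int × Int) × Int)) (k : Int × Int) :
    wsum (p :: L) k = (if p.1 = k then p.2 else 0) + wsum L k := by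
  simp only [wsum, List.filter_cons]
  split <;> simp_all

theorem RepD_foldl (s : Int) (step : PolyD → ((Int × Int) × Int) → PolyD)
    (hstep : ∀ (d : PolyD) (f : (Int × Int) → Int) (p : (Int × Int) × Int), RepD d f →
      RepD (step d p) (fun k => if k = p.1 then f p.1 + s * p.2 else f k))
    (L : List ((Int × Int) × Int)) : ∀ (d : PolyD) (f : (Int × Int) → Int), RepD d f →
    RepD (L.foldl step d) (fun k => f k + s * wsum L k) := by
  induction L with
  | nil => intro d f h; simpa [wsum] using RepD_congr h (by intro k; ring_nf)
  | cons p L' ih =>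
    intro d f h
    have h1 := ih (step d p) _ (hstep d f p h)
    refine RepD_congr h1 (fun k => ?_)
    rw [wsum_cons]
    by_cases hk : k = p.1
    · subst hk
      simp only [show (p.1 = p.1) = True from by simp, if_true]
      ring
    · have h2 : ¬ (p.1 = k) := Ne.symm hk
      simp only [if_neg hk, if_neg h2]
      ring

theorem wsum_eq_zero {L : List ((Int × Int) × Int)} {k : Int × Int}
    (h : k ∉ L.map (·.1)) : wsum L k = 0 := by
  induction L with
  | nil => rfl
  | cons p t ih =>
    simp only [List.map_cons, List.mem_cons] at h
    rw [wsum_cons, if_neg (Ne.symm (fun he => h (Or.inl he))), ih (fun hm => h (Or.inr hm)), add_zero]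

theorem wsum_get? (L : List ((Int × Int) × Int)) (h : (L.map (·.1)).Nodup) (k : Int × Int) :
    wsum L k = ((PySem.Dict.mk L).get? k).getD 0 := by
  induction L with
  | nil => simp [wsum, PySem.Dict.get?]
  | cons p t ih =>
    simp only [List.map_cons, List.nodup_cons] at h
    rw [wsum_cons]
    obtain ⟨k1, v1⟩ := p
    rw [PySem.Dict.get?_mk_cons]
    by_cases hk : k1 = k
    · subst hk
      rw [if_pos rfl, wsum_eq_zero (by simpa using h.1)]
      simp
    · rw [if_neg hk, if_neg (by simpa using hk), ih h.2]
      simp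



theorem RepD_wsum_items {o : PolyD} {g : (Int × Int) → Int} (ho : RepD o g) (k : Int × Int) :
    wsum o.items k = g k := by
  have h1 : (o.items.map (·.1)).Nodup := ho.1
  rw [wsum_get? o.items h1 k]
  have h2 : (PySem.Dict.mk o.items) = o := rfl
  rw [h2, ho.2 k]
  split <;> simp_all

theorem RepD_addPoly {p o : PolyD} {f g : (Int × Int) → Int} (s : Int)
    (hp : RepD p f) (ho : RepD o g) : RepD (addPoly p o s) (fun k => f k + s * g k) := by
  have h1 := RepD_foldl s _ (fun d f kv h => RepD_step s h kv.1 kv.2) o.items p f hp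
  exact RepD_congr h1 (fun k => by rw [RepD_wsum_items ho k])

theorem RepD_step_sub {d : PolyD} {f : (Int × Int) → Int} (h : RepD d f)
    (k0 : Int × Int) (v0 : Int) :
    RepD (let nv := d.getD k0 0 - v0
          if nv = 0 then d.erase k0 else d.insert k0 nv)
      (fun k => if k = k0 then f k0 + (-1) * v0 else f k) := by
  simp only [RepD_getD h k0]
  by_cases hz : f k0 - v0 = 0
  · simp only [if_pos hz]
    refine RepD_congr (RepD_erase h k0) (fun k => ?_)
    by_cases hk : k = k0 <;> simp [hk] <;> omega
  · simp only [if_neg hz]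
    refine RepD_congr (RepD_insert h k0 _ hz) (fun k => ?_)
    by_cases hk : k = k0 <;> simp [hk] <;> omega

theorem RepD_subPoly {p o : PolyD} {f g : (Int × Int) → Int}
    (hp : RepD p f) (ho : RepD o g) : RepD (subPoly p o) (fun k => f k - g k) := by
  have h1 := RepD_foldl (-1) _ (fun d f kv h => RepD_step_sub h kv.1 kv.2) o.items p f hp
  refine RepD_congr h1 (fun k => ?_)
  rw [RepD_wsum_items ho k]; ring


theorem foldl_insert_fresh (L : List ((Int × Int) × Int)) : ∀ (d : PolyD),
    (∀ p ∈ L, d.contains p.1 = false) → ((L.map (·.1)).Nodup) →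
    (L.foldl (fun acc p => acc.insert p.1 p.2) d).items = d.items ++ L := by
  induction L with
  | nil => intro d _ _; simp
  | cons p t ih =>
    intro d hfresh hnd
    simp only [List.map_cons, List.nodup_cons] at hnd
    have hc : d.contains p.1 = false := hfresh p (by simp)
    have hins : (d.insert p.1 p.2).items = d.items ++ [(p.1, p.2)] := by
      simp [PySem.Dict.insert, hc]
    rw [List.foldl_cons, ih (d.insert p.1 p.2) ?_ hnd.2, hins]
    · simp
    · intro q hq
      rw [PySem.Dict.contains_insert]
      have h1 : d.contains q.1 = false := hfresh q (by simp [hq])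
      have h2 : q.1 ≠ p.1 := by
        intro h
        exact hnd.1 (List.mem_map.mpr ⟨q, hq, h ▸ rfl⟩)
      simp [h1, h2]

theorem ofList_items (L : List ((Int × Int) × Int)) (hnd : (L.map (·.1)).Nodup) :
    (PySem.Dict.ofList L).items = L := by
  have := foldl_insert_fresh L PySem.Dict.empty (fun p _ => by simp [PySem.Dict.contains, PySem.Dict.empty]) hnd
  simpa [PySem.Dict.ofList, PySem.Dict.update, PySem.Dict.empty] using this

theorem RepD_shiftPoly {p : PolyD} {f : (Int × Int) → Int} (hp : RepD p f) (da db : Int)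
    : RepD (shiftPoly p da db) (fun k => f (k.1 - da, k.2 - db)) := by
  have hinj : Function.Injective (fun k : Int × Int => (k.1 + da, k.2 + db)) := by
    intro a b h; simp only [Prod.mk.injEq] at h; exact Prod.ext (by omega) (by omega)
  have hnd : ((p.items.map (fun kv => ((kv.1.1 + da, kv.1.2 + db), kv.2))).map (·.1)).Nodup := by
    have h1 : (p.items.map (·.1)).Nodup := hp.1
    have : (p.items.map (fun kv => ((kv.1.1 + da, kv.1.2 + db), kv.2))).map (·.1)
        = (p.items.map (·.1)).map (fun k => (k.1 + da, k.2 + db)) := by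
      simp [List.map_map]
    rw [this]
    exact (List.nodup_map_iff hinj).mpr h1
  have hitems : (shiftPoly p da db).items = p.items.map (fun kv => ((kv.1.1 + da, kv.1.2 + db), kv.2)) :=
    ofList_items _ hnd
  refine ⟨by rw [PySem.Dict.keys, hitems]; exact hnd, fun k => ?_⟩
  have hget : ∀ (L : List ((Int × Int) × Int)) (k : Int × Int),
      (PySem.Dict.mk (L.map (fun kv => ((kv.1.1 + da, kv.1.2 + db), kv.2)))).get? k
        = (PySem.Dict.mk L).get? (k.1 - da, k.2 - db) := by
    intro L k
    induction L with
    | nil => rfl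
    | cons q t ih =>
      simp only [List.map_cons]
      rw [PySem.Dict.get?_mk_cons, PySem.Dict.get?_mk_cons]
      have : ((q.1.1 + da, q.1.2 + db) == k) = (q.1 == (k.1 - da, k.2 - db)) := by
        obtain ⟨⟨a, b⟩, v⟩ := q
        obtain ⟨x, y⟩ := k
        by_cases h : ((a, b) : Int × Int) = (x - da, y - db)
        · have h' : ((a + da, b + db) : Int × Int) = (x, y) := by
            rw [Prod.mk.injEq] at h ⊢; omega
          simp [h, h']
        · have h' : ((a + da, b + db) : Int × Int) ≠ (x, y) := by
            rw [Prod.mk.injEq] at h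
            intro hc; rw [Prod.mk.injEq] at hc; omega
          simp [h, h']
      rw [this, ih]
  have h2 : (shiftPoly p da db).get? k = p.get? (k.1 - da, k.2 - db) := by
    have e1 : shiftPoly p da db = PySem.Dict.mk (p.items.map (fun kv => ((kv.1.1 + da, kv.1.2 + db), kv.2))) := by
      apply PySem.Dict.ext; rw [hitems]
    have e2 : p = PySem.Dict.mk p.items := rfl
    rw [e1, hget p.items k, ← e2]
  rw [h2, hp.2 (k.1 - da, k.2 - db)]


theorem canon_eq_of_RepD {d1 d2 : PolyD} {f : (Int × Int) → Int}
    (h1 : RepD d1 f) (h2 : RepD d2 f) : canonPoly d1 = canonPoly d2 := by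
  have hperm : d1.items.Perm d2.items := by
    rw [List.perm_ext_iff_of_nodup (h1.1.of_map _) (h2.1.of_map _)]
    intro a
    obtain ⟨k, v⟩ := a
    rw [← PySem.Dict.get?_eq_some_iff_mem_items d1 k v h1.1,
        ← PySem.Dict.get?_eq_some_iff_mem_items d2 k v h2.1, h1.2 k, h2.2 k]
  have key : ((Int × Int) × Int) → Lex (Int × Int) := fun p => toLex p.1
  have hys : (canonPoly d1).Perm d2.items :=
    (PySem.List.sorted_perm d1.items _ false).trans hperm
  have hle : (canonPoly d1).Pairwise (fun a b => (toLex a.1 : Lex (Int × Int)) ≤ toLex b.1) :=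
    PySem.List.sorted_pairwise d1.items _
  have hndmap : ((canonPoly d1).map (fun p => p.1)).Nodup := by
    have hp : ((canonPoly d1).map (fun p => p.1)).Perm (d1.items.map (fun p => p.1)) :=
      (PySem.List.sorted_perm d1.items _ false).map _
    exact hp.nodup_iff.mpr h1.1
  have hne : (canonPoly d1).Pairwise (fun a b => a.1 ≠ b.1) := by
    have := (List.pairwise_map).mp hndmap
    exact this
  have hlt : (canonPoly d1).Pairwise (fun a b => (toLex a.1 : Lex (Int × Int)) < toLex b.1) := by
    refine (hle.and hne).imp ?_
    rintro a b ⟨hab, hne'⟩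
    exact lt_of_le_of_ne hab (fun hc => hne' (toLex.injective hc))
  exact (PySem.List.sorted_eq_of_perm_of_pairwise_lt d2.items (canonPoly d1) _ hys hlt).symm


theorem RepD_dictModify {d : PolyD} {f : (Int × Int) → Int} (h : RepD d f) (k0 : Int × Int)
    (hnn : ∀ k, 0 ≤ f k) :
    RepD (d.modify k0 0 (· + 1)) (fun k => if k = k0 then f k0 + 1 else f k) := by
  have : d.modify k0 0 (· + 1) = d.insert k0 (d.getD k0 0 + 1) := rfl
  rw [this, RepD_getD h k0]
  exact RepD_insert h k0 _ (by have := hnn k0; omega)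

theorem dfsB_rep (t : PTree) : ∀ (a b : Int) (vec : List PolyD) (g : Nat → (Int × Int) → Int),
    vec.length = 6 →
    (∀ i : Fin 6, RepD (vec.getD i.val PySem.Dict.empty) (g i.val)) →
    (∀ i k, 0 ≤ g i k) →
    (dfsB t a b vec).length = 6 ∧
    ∀ i : Fin 6, RepD ((dfsB t a b vec).getD i.val PySem.Dict.empty)
      (fun k => g i.val k + contrib t i.val (k.1 - a, k.2 - b)) := by
  induction t with
  | leaf s =>
    intro a b vec g hlen hrep hnn
    simp only [dfsB]
    cases hidx : PySem.List.index? pvVARS s with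
    | none =>
      refine ⟨hlen, fun i => ?_⟩
      refine RepD_congr (hrep i) (fun k => ?_)
      have hidx' : List.idxOf? s pvVARS = none := hidx
      simp only [contrib, PySem.List.index?, hidx']
      simp
    | some j =>
      refine ⟨by rw [List.length_modify]; exact hlen, fun i => ?_⟩
      have hi6 : i.val < vec.length := by rw [hlen]; exact i.isLt
      have hget : vec[i.val]? = some vec[i.val] := List.getElem?_eq_getElem hi6
      have hcomp : (vec.modify j (fun d => d.modify (a, b) 0 (· + 1))).getD i.val PySem.Dict.empty
          = if j = i.val then vec[i.val].modify (a, b) 0 (· + 1) else vec[i.val] := by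
        simp only [List.getD, List.getElem?_modify, hget]
        split <;> simp
      have hveci : RepD vec[i.val] (g i.val) := by
        have := hrep i
        rwa [List.getD, hget] at this
      by_cases hij : j = i.val
      · rw [hcomp, if_pos hij]
        refine RepD_congr (RepD_dictModify hveci (a, b) (fun k => ?_)) (fun k => ?_)
        · exact hnn i.val k
        · subst hij
          simp only [contrib, hidx]
          by_cases hk : k = (a, b)
          · have h0 : ((k.1 - a, k.2 - b) : Int × Int) = (0, 0) := by
              rw [hk]; simp
            simp [hk, h0]
          · have h0 : ((k.1 - a, k.2 - b) : Int × Int) ≠ (0, 0) := by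
              intro hc
              rw [Prod.mk.injEq] at hc
              apply hk
              obtain ⟨x, y⟩ := k
              rw [Prod.mk.injEq]
              simp only at hc
              omega
            simp [hk, h0]
      · rw [hcomp, if_neg hij]
        refine RepD_congr hveci (fun k => ?_)
        simp only [contrib, hidx]
        have : ¬ (some j = some i.val ∧ ((k.1 - a, k.2 - b) : Int × Int) = (0, 0)) := by
          intro hc; exact hij (Option.some.inj hc.1)
        rw [if_neg this, add_zero]
  | node l r ihl ihr =>
    intro a b vec g hlen hrep hnn
    obtain ⟨hlen1, hrep1⟩ := ihl (a + 1) b vec g hlen hrep hnn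
    have hnn1 : ∀ i k, 0 ≤ (fun (i : Nat) k => g i k + contrib l i (k.1 - (a + 1), k.2 - b)) i k :=
      fun i k => add_nonneg (hnn i k) (contrib_nonneg l i _)
    obtain ⟨hlen2, hrep2⟩ := ihr a (b + 1) (dfsB l (a + 1) b vec) _ hlen1 hrep1 hnn1
    refine ⟨hlen2, fun i => ?_⟩
    refine RepD_congr (hrep2 i) (fun k => ?_)
    simp only [contrib]
    have e1 : ((k.1 - a - 1, k.2 - b) : Int × Int) = (k.1 - (a + 1), k.2 - b) := by
      rw [Prod.mk.injEq]; omega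
    have e2 : ((k.1 - a, k.2 - b - 1) : Int × Int) = (k.1 - a, k.2 - (b + 1)) := by
      rw [Prod.mk.injEq]; omega
    simp only [e1, e2]
    ring

def StackRel (v : List PolyD) (t : PTree) : Prop :=
  v.length = 6 ∧ ∀ i : Fin 6, RepD (v.getD i.val PySem.Dict.empty) (contrib t i.val)

theorem StackRel_leaf (token : String) (j : Nat) (hidx : PySem.List.index? pvVARS token = some j) :
    StackRel ((List.replicate 6 (PySem.Dict.empty : PolyD)).set j
      (PySem.Dict.empty.insert (0, 0) 1)) (PTree.leaf token) := by
  have hj6 : j < 6 := by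
    have := List.idxOf?_eq_some_iff.mp hidx
    simpa [pvVARS] using this.1
  refine ⟨by simp, fun i => ?_⟩
  have hgd : ((List.replicate 6 (PySem.Dict.empty : PolyD)).set j
      (PySem.Dict.empty.insert (0, 0) 1)).getD i.val PySem.Dict.empty
      = if j = i.val then PySem.Dict.empty.insert (0, 0) 1 else PySem.Dict.empty := by
    simp only [List.getD, List.getElem?_set, List.getElem?_replicate, i.isLt, if_pos]
    split <;> simp [hj6]
  rw [hgd]
  by_cases hij : j = i.val
  · rw [if_pos hij]
    refine RepD_congr (RepD_insert RepD_empty (0, 0) 1 one_ne_zero) (fun k => ?_)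
    simp only [contrib, hidx, hij]
    by_cases hk : k = (0, 0) <;> simp [hk]
  · rw [if_neg hij]
    refine RepD_congr RepD_empty (fun k => ?_)
    simp only [contrib, hidx]
    have : ¬ (some j = some i.val ∧ k = (0, 0)) := fun hc => hij (Option.some.inj hc.1)
    rw [if_neg this]

theorem StackRel_node {vL vR : List PolyD} {tL tR : PTree}
    (hL : StackRel vL tL) (hR : StackRel vR tR) :
    StackRel ((List.range 6).map (fun i =>
      addPoly (shiftPoly (vL.getD i PySem.Dict.empty) 1 0)
              (shiftPoly (vR.getD i PySem.Dict.empty) 0 1) 1)) (PTree.node tL tR) := by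
  refine ⟨by simp, fun i => ?_⟩
  have hgd : ((List.range 6).map (fun i =>
      addPoly (shiftPoly (vL.getD i PySem.Dict.empty) 1 0)
              (shiftPoly (vR.getD i PySem.Dict.empty) 0 1) 1)).getD i.val PySem.Dict.empty
      = addPoly (shiftPoly (vL.getD i.val PySem.Dict.empty) 1 0)
              (shiftPoly (vR.getD i.val PySem.Dict.empty) 0 1) 1 := by
    simp [List.getD, i.isLt]
  rw [hgd]
  have h1 := RepD_shiftPoly (hL.2 i) 1 0
  have h2 := RepD_shiftPoly (hR.2 i) 0 1
  refine RepD_congr (RepD_addPoly 1 h1 h2) (fun k => ?_)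
  simp only [contrib]
  have e : k.2 - 0 = k.2 ∧ k.1 - 0 = k.1 := by omega
  rw [e.1, e.2, one_mul]

theorem fold_inv (ts : List String) : ∀ (sA : List (List PolyD)) (sB : List PTree),
    List.Forall₂ StackRel sA sB → okTokens ts sA.length = true →
    List.Forall₂ StackRel (ts.foldl stepA sA) (ts.foldl stepB sB) ∧
      1 ≤ (ts.foldl stepA sA).length := by
  induction ts with
  | nil =>
    intro sA sB hinv hok
    simp only [okTokens, decide_eq_true_eq] at hok
    exact ⟨hinv, hok⟩
  | cons t ts ih =>
    intro sA sB hinv hok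
    simp only [okTokens] at hok
    by_cases hplus : t == "+"
    · rw [if_pos hplus] at hok
      simp only [Bool.and_eq_true, decide_eq_true_eq] at hok
      obtain ⟨hlen2, hok'⟩ := hok
      cases hinv with
      | nil => simp at hlen2
      | cons h1 hinv' =>
        rename_i v1 t1 restA restB
        cases hinv' with
        | nil => simp at hlen2
        | cons h2 hinv'' =>
          rename_i v2 t2 restA' restB'
          have hsA : stepA (v1 :: v2 :: restA') t = ((List.range 6).map (fun i =>
              addPoly (shiftPoly (v2.getD i PySem.Dict.empty) 1 0)
                      (shiftPoly (v1.getD i PySem.Dict.empty) 0 1) 1)) :: restA' := by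
            simp [stepA, hplus]
          have hsB : stepB (t1 :: t2 :: restB') t = PTree.node t2 t1 :: restB' := by
            simp [stepB, hplus]
          simp only [List.foldl_cons, hsA, hsB]
          apply ih
          · exact List.Forall₂.cons (StackRel_node h2 h1) hinv''
          · simp only [List.length_cons]
            have : restA'.length + 1 = (v1 :: v2 :: restA').length - 1 := by simp
            rw [this]
            exact hok'
    · rw [if_neg hplus] at hok
      simp only [Bool.and_eq_true] at hok
      obtain ⟨hsome, hok'⟩ := hok
      obtain ⟨j, hj⟩ := Option.isSome_iff_exists.mp hsome
      have hsA : stepA sA t = ((List.replicate 6 (PySem.Dict.empty : PolyD)).set j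
          (PySem.Dict.empty.insert (0, 0) 1)) :: sA := by
        have hj' : List.idxOf? t pvVARS = some j := hj
        simp [stepA, hplus, PySem.List.index?, hj']
      have hsB : stepB sB t = PTree.leaf t :: sB := by
        simp [stepB, hplus]
      simp only [List.foldl_cons, hsA, hsB]
      apply ih
      · exact List.Forall₂.cons (StackRel_leaf t j hj) hinv
      · simpa using hok'

theorem forall₂_getLast? {R : List PolyD → PTree → Prop} : ∀ {sA : List (List PolyD)} {sB : List PTree},
    List.Forall₂ R sA sB → ∀ (v : List PolyD), sA.getLast? = some v →
    ∃ t, sB.getLast? = some t ∧ R v t := by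
  intro sA sB h
  induction h with
  | nil => intro v hv; simp at hv
  | @cons a b as bs h1 h2 ih =>
    intro v hv
    cases h2 with
    | nil =>
      simp at hv
      exact ⟨b, by simp, hv ▸ h1⟩
    | @cons a' b' as' bs' h3 h4 =>
      have hv' : (a' :: as').getLast? = some v := by
        rwa [List.getLast?_cons_cons] at hv
      obtain ⟨t, ht, hrt⟩ := ih v hv'
      exact ⟨t, by rwa [List.getLast?_cons_cons], hrt⟩

theorem term_rep (tokens : List String) (hok : okTokens tokens 0 = true) :
    ∃ root, StackRel (termPolynomialVector tokens) root ∧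
      (termCounters tokens).length = 6 ∧
      ∀ i : Fin 6, RepD ((termCounters tokens).getD i.val PySem.Dict.empty) (contrib root i.val) := by
  obtain ⟨hinv, hlen⟩ := fold_inv tokens [] [] List.Forall₂.nil (by simpa using hok)
  have hne : (tokens.foldl stepA []) ≠ [] := by
    intro hc; rw [hc] at hlen; simp at hlen
  obtain ⟨v, hv⟩ := Option.isSome_iff_exists.mp (List.getLast?_isSome.mpr hne)
  obtain ⟨root, hroot, hrel⟩ := forall₂_getLast? hinv v hv
  refine ⟨root, ?_, ?_, ?_⟩
  · simpa [termPolynomialVector, hv] using hrel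
  · simp only [termCounters, parseB, hroot]
    exact (dfsB_rep root 0 0 (List.replicate 6 PySem.Dict.empty) (fun _ _ => 0) (by simp)
      (fun i => by
        rw [List.getD, List.getElem?_replicate, if_pos i.isLt]
        exact RepD_empty) (fun _ _ => le_refl 0)).1
  · intro i
    simp only [termCounters, parseB, hroot]
    have h := (dfsB_rep root 0 0 (List.replicate 6 PySem.Dict.empty) (fun _ _ => 0) (by simp)
      (fun i => by
        rw [List.getD, List.getElem?_replicate, if_pos i.isLt]
        exact RepD_empty) (fun _ _ => le_refl 0)).2 i
    refine RepD_congr h (fun k => ?_)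
    have e : ((k.1 - 0, k.2 - 0) : Int × Int) = k := by
      obtain ⟨x, y⟩ := k; rw [Prod.mk.injEq]; omega
    rw [e, zero_add]

theorem eq_diff (lhs rhs : List String) (hl : okTokens lhs 0 = true) (hr : okTokens rhs 0 = true) :
    (List.range 6).map (fun i =>
        canonPoly (addPoly ((termPolynomialVector lhs).getD i PySem.Dict.empty)
          ((termPolynomialVector rhs).getD i PySem.Dict.empty) (-1)))
      = List.zipWith (fun l r => canonPoly (subPoly l r)) (termCounters lhs) (termCounters rhs) := by
  obtain ⟨rootL, hAL, hBLlen, hBL⟩ := term_rep lhs hl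
  obtain ⟨rootR, hAR, hBRlen, hBR⟩ := term_rep rhs hr
  apply List.ext_getElem
  · simp [hBLlen, hBRlen]
  · intro i hi1 hi2
    have hi6 : i < 6 := by simpa using hi1
    have hiF : (⟨i, hi6⟩ : Fin 6).val = i := rfl
    rw [List.getElem_map, List.getElem_range, List.getElem_zipWith]
    have hBLget : (termCounters lhs)[i] = (termCounters lhs).getD i PySem.Dict.empty := by
      rw [List.getD, List.getElem?_eq_getElem (by omega)]; rfl
    have hBRget : (termCounters rhs)[i] = (termCounters rhs).getD i PySem.Dict.empty := by
      rw [List.getD, List.getElem?_eq_getElem (by omega)]; rfl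
    rw [hBLget, hBRget]
    have h1 := RepD_addPoly (-1) (hAL.2 ⟨i, hi6⟩) (hAR.2 ⟨i, hi6⟩)
    have h2 := RepD_subPoly (hBL ⟨i, hi6⟩) (hBR ⟨i, hi6⟩)
    exact canon_eq_of_RepD (RepD_congr h1 (fun k => by ring)) h2

theorem foldl_append_map {α β : Type} (g : α → β) (l : List α) : ∀ acc,
    l.foldl (fun acc x => acc ++ [g x]) acc = acc ++ l.map g := by
  induction l with
  | nil => intro acc; simp
  | cons x t ih => intro acc; simp [ih]


-- ===== VERDICT (by name: the statement is the Claim_ definition above) =====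
theorem equation_difference_vectors_spec : Claim_equal_equation_difference_vectors := by
  intro equations hdom hpre
  unfold Pre_equation_difference_vectors at hpre
  unfold Spec_equation_difference_vectors
  unfold equation_difference_vectors equation_difference_vectors_alt
  rw [foldl_append_map, List.nil_append]
  apply List.map_congr_left
  intro eq heq
  have hok := List.all_eq_true.mp hpre eq heq
  simp only [Bool.and_eq_true] at hok
  exact eq_diff eq.1 eq.2.1 hok.1 hok.2
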